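-- pv_equiv track=rewrite | github.com/krishnakumarbhat/Research_proj | genai/autoresearch/ml/project_rag_chunking_optimization.py | _synthetic_records
-- ===== SOURCE A (Python) =====
-- def _synthetic_records(total: int) -> list[dict[str, str]]:
--     base = [
--         {
--             "claim": "Vitamin C shortens the duration of the common cold.",
--             "abstract": "Clinical meta-analysis shows vitamin C does not reliably prevent the common cold in the general population, although some trials found a small reduction in duration under sustained supplementation.",
--         },
--         {
--             "claim": "Black holes emit radiation according to quantum effects.",
--             "abstract": "Hawking radiation arises when quantum field fluctuations near the event horizon generate particle pairs, causing black holes to lose mass over extremely long timescales.",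
--         },
--         {
--             "claim": "Plate tectonics explains the movement of continents.",
--             "abstract": "The plate tectonics model accounts for continental drift by describing how lithospheric plates move atop the mantle and interact at convergent, divergent, and transform boundaries.",
--         },
--         {
--             "claim": "mRNA vaccines deliver genetic instructions for antigen production.",
--             "abstract": "mRNA vaccine platforms transport a messenger RNA payload into host cells, which then synthesize the encoded antigen and trigger adaptive immune responses.",
--         },
--     ]
--     return [base[index % len(base)].copy() for index in range(total)]
-- ===== SOURCE B (Python) =====
-- def _synthetic_records(total: int) -> list[dict[str, str]]:
--     base = [
--         {
--             "claim": "Vitamin C shortens the duration of the common cold.",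
--             "abstract": "Clinical meta-analysis shows vitamin C does not reliably prevent the common cold in the general population, although some trials found a small reduction in duration under sustained supplementation.",
--         },
--         {
--             "claim": "Black holes emit radiation according to quantum effects.",
--             "abstract": "Hawking radiation arises when quantum field fluctuations near the event horizon generate particle pairs, causing black holes to lose mass over extremely long timescales.",
--         },
--         {
--             "claim": "Plate tectonics explains the movement of continents.",
--             "abstract": "The plate tectonics model accounts for continental drift by describing how lithospheric plates move atop the mantle and interact at convergent, divergent, and transform boundaries.",
--         },
--         {
--             "claim": "mRNA vaccines deliver genetic instructions for antigen production.",
--             "abstract": "mRNA vaccine platforms transport a messenger RNA payload into host cells, which then synthesize the encoded antigen and trigger adaptive immune responses.",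
--         },
--     ]
--     if total <= 0:
--         return []
--     q, r = divmod(total, len(base))
--     full_blocks = [d.copy() for _ in range(q) for d in base]
--     return full_blocks + [d.copy() for d in base[:r]]
-- ===== Notes on version B (the rewrite author's own statement) =====
-- stated objective: alternative
-- what changed: Divmod block decomposition: instead of a single comprehension computing base[index % 4] per index, B computes q, r = divmod(total, 4) once, builds the q whole copies of base with a nested blocks-times-base comprehension (no per-element index arithmetic) and concatenates the remainder prefix base[:r].
import Mathlib
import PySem

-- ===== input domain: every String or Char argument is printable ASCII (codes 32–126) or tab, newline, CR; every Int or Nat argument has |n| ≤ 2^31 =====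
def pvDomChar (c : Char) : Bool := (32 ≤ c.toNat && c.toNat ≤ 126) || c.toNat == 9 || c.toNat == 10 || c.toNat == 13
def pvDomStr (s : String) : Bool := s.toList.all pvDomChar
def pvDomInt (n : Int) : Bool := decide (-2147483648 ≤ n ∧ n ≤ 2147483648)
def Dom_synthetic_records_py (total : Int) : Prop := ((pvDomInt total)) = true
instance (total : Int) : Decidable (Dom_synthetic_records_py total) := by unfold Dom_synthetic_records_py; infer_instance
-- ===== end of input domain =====

-- B replaces A's per-index modulo comprehension by a divmod block decomposition (q whole copies of base appended blockwise, then a remainder prefix); objective: alternative, same cost.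

-- the shared `base` constant (a list of dicts; dict → association list)
def pvBase : List (List (String × String)) :=
  [ [("claim", "Vitamin C shortens the duration of the common cold."),
     ("abstract", "Clinical meta-analysis shows vitamin C does not reliably prevent the common cold in the general population, although some trials found a small reduction in duration under sustained supplementation.")],
    [("claim", "Black holes emit radiation according to quantum effects."),
     ("abstract", "Hawking radiation arises when quantum field fluctuations near the event horizon generate particle pairs, causing black holes to lose mass over extremely long timescales.")],
    [("claim", "Plate tectonics explains the movement of continents."),
     ("abstract", "The plate tectonics model accounts for continental drift by describing how lithospheric plates move atop the mantle and interact at convergent, divergent, and transform boundaries.")],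
    [("claim", "mRNA vaccines deliver genetic instructions for antigen production."),
     ("abstract", "mRNA vaccine platforms transport a messenger RNA payload into host cells, which then synthesize the encoded antigen and trigger adaptive immune responses.")] ]

-- ===== PORT A =====
-- [base[index % len(base)].copy() for index in range(total)]; dict.copy() is the identity on the association list
def synthetic_records_py (total : Int) : List (List (String × String)) :=
  (PySem.List.pyRange 0 total 1).map
    (fun index => PySem.List.pyGetD pvBase (PySem.Int.mod index (pvBase.length : Int)) [])

-- ===== PORT B =====
-- if total <= 0: return []; q, r = divmod(total, len(base));
-- full_blocks = [d.copy() for _ in range(q) for d in base]; return full_blocks + [d.copy() for d in base[:r]]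
def synthetic_records_py_alt (total : Int) : List (List (String × String)) :=
  if total ≤ 0 then []
  else
    ((List.range (PySem.Int.floordiv total (pvBase.length : Int)).toNat).flatMap
      (fun _ => pvBase.map (fun d => d)))
    ++ (PySem.List.slice pvBase none (some (PySem.Int.mod total (pvBase.length : Int)))).map (fun d => d)

-- ===== PRECONDITION & SPEC =====
def Spec_synthetic_records_py (total : Int) (out : List (List (String × String))) : Prop := out = synthetic_records_py_alt total
instance (total : Int) (out : List (List (String × String))) : Decidable (Spec_synthetic_records_py total out) := by unfold Spec_synthetic_records_py; infer_instance

-- ===== CLAIM (what is proved, stated in full; the proofs are below) =====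
def Claim_equal_synthetic_records_py : Prop := ∀ (total : Int), Dom_synthetic_records_py total → Spec_synthetic_records_py total (synthetic_records_py total)

-- ===== LEMMAS AND PROOFS =====

lemma flatMap_range_const {α : Type} (q : Nat) (l : List α) :
    (List.range q).flatMap (fun _ => l) = (List.replicate q l).flatten := by
  induction q with
  | zero => simp
  | succ q ih =>
    rw [List.range_succ, List.flatMap_append, ih, List.replicate_succ', List.flatten_append]
    simp

lemma flatten_replicate_getElem? {α : Type} (l : List α) (k i : Nat) (hi : i < k * l.length) :
    ((List.replicate k l).flatten)[i]? = l[i % l.length]? := by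
  induction k generalizing i with
  | zero => simp at hi
  | succ k ih =>
    have hlen : 0 < l.length := by
      rcases Nat.eq_zero_or_pos l.length with h | h
      · simp [h] at hi
      · exact h
    rw [List.replicate_succ, List.flatten_cons]
    by_cases h : i < l.length
    · rw [List.getElem?_append_left h, Nat.mod_eq_of_lt h]
    · replace h : l.length ≤ i := by omega
      have hmul : (k + 1) * l.length = k * l.length + l.length := by ring
      rw [List.getElem?_append_right h, ih (i - l.length) (by omega),
        Nat.mod_eq_sub_mod h]

lemma length_flatten_replicate {α : Type} (l : List α) (q : Nat) :
    ((List.replicate q l).flatten).length = q * l.length := by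
  induction q with
  | zero => simp
  | succ q ih => rw [List.replicate_succ, List.flatten_cons]; simp [ih]; ring

lemma map_range_mod_eq_blocks {α : Type} (l : List α) (d : α)
    (hl : 0 < l.length) (n : Nat) :
    (List.range n).map (fun k => l.getD (k % l.length) d)
      = (List.replicate (n / l.length) l).flatten ++ l.take (n % l.length) := by
  apply List.ext_getElem?
  intro i
  have hq : (n / l.length) * l.length + n % l.length = n := by
    rw [Nat.mul_comm]; exact Nat.div_add_mod n l.length
  by_cases hi : i < n
  · rw [List.getElem?_map, List.getElem?_range hi]
    have him : i % l.length < l.length := Nat.mod_lt i hl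
    by_cases h : i < (n / l.length) * l.length
    · rw [List.getElem?_append_left (by rw [length_flatten_replicate]; exact h),
        flatten_replicate_getElem? l _ i h]
      simp [List.getD_eq_getElem?_getD, List.getElem?_eq_getElem him]
    · replace h : (n / l.length) * l.length ≤ i := by omega
      have hml := Nat.mod_lt n hl
      rw [List.getElem?_append_right (by rw [length_flatten_replicate]; exact h),
        length_flatten_replicate, List.getElem?_take]
      have hlt : i - n / l.length * l.length < n % l.length := by omega
      rw [if_pos hlt]
      have hmod : i % l.length = i - n / l.length * l.length := by
        have heq : i = n / l.length * l.length + (i - n / l.length * l.length) := by omega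
        conv_lhs => rw [heq]
        rw [Nat.mul_add_mod', Nat.mod_eq_of_lt (by omega)]
      simp only [Option.map_some]
      rw [hmod]
      simp [List.getD_eq_getElem?_getD, List.getElem?_eq_getElem (by omega : i - n / l.length * l.length < l.length)]
  · rw [List.getElem?_map,
      List.getElem?_eq_none (by simpa using by omega : (List.range n).length ≤ i),
      List.getElem?_eq_none]
    · rfl
    · rw [List.length_append, length_flatten_replicate, List.length_take]
      omega

-- ===== VERDICT (by name: the statement is the Claim_ definition above) =====
theorem synthetic_records_py_spec : Claim_equal_synthetic_records_py := by
  intro total _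
  unfold Spec_synthetic_records_py synthetic_records_py synthetic_records_py_alt
  have hlen : (pvBase.length : Int) = 4 := by decide
  by_cases hpos : total ≤ 0
  · rw [if_pos hpos, PySem.List.pyRange_one_eq_nil (by omega)]
    simp
  · rw [if_neg hpos]
    obtain ⟨n, rfl⟩ : ∃ n : Nat, total = (n : Nat) :=
      ⟨total.toNat, (Int.toNat_of_nonneg (by omega)).symm⟩
    have h4 : (pvBase.length : Int) = ((4 : Nat) : Int) := by decide
    rw [h4, PySem.Int.floordiv_natCast n 4, PySem.Int.mod_natCast n 4,
      PySem.List.slice_to_natCast, PySem.List.pyRange_one]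
    have htoNat : ((n / 4 : Nat) : Int).toNat = n / 4 := by omega
    rw [htoNat]
    simp only [List.map_id']
    rw [flatMap_range_const]
    have hn' : ((n : Int) - 0).toNat = n := by omega
    rw [hn', List.map_map]
    have hmain := map_range_mod_eq_blocks pvBase [] (by decide) n
    have hl4 : pvBase.length = 4 := by decide
    rw [hl4] at hmain
    rw [← hmain]
    apply List.map_congr_left
    intro k _
    simp only [Function.comp]
    rw [zero_add, PySem.Int.mod_natCast k 4, PySem.List.pyGetD_natCast]
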